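-- pv_equiv track=rewrite | github.com/jakubplata/wapor | wapor/src/basic.py | parsuj_dane
-- ===== SOURCE A (Python) =====
-- def parsuj_dane(dane):
--     """
--     Przetworzenie wczytanych warstw lub plików *.acs do postaci dwóch zbiorów,
--     pierwszy zawiera parametry, natomiast drugi dane
--     :param warstwy:
--     :return:
--     """
--     indeks = 0
--     for nr, d in enumerate(dane):
--         if d == '****':
--             indeks = nr + 1
--     if indeks == 0:
--         raise ValueError('Podano błędne dane do przetworzenia! - plik: ')
--     warstwy_param = dane[0:indeks]
--     warstwy_data = dane[indeks:]
--     warstwy_data.insert(0, '**') # uzpelnienie wartosci bazowej dla listy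
--     return warstwy_param, warstwy_data
-- ===== SOURCE B (Python) =====
-- def parsuj_dane(dane):
--     # single pass with flush-on-marker accumulators: no indices, no slicing
--     param, tail, seen = [], [], False
--     for d in dane:
--         if d == '****':
--             param += tail
--             param.append('****')
--             tail = []
--             seen = True
--         else:
--             tail.append(d)
--     if not seen:
--         raise ValueError('Podano błędne dane do przetworzenia! - plik: ')
--     return param, ['**'] + tail
-- ===== Notes on version B (the rewrite author's own statement) =====
-- stated objective: alternative
-- what changed: B keeps no index at all: a single pass maintains (param, tail) accumulators and flushes tail into param at every '****' marker, so the split falls out of the accumulator state instead of A's recorded last-marker index plus slicing.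
import Mathlib
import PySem

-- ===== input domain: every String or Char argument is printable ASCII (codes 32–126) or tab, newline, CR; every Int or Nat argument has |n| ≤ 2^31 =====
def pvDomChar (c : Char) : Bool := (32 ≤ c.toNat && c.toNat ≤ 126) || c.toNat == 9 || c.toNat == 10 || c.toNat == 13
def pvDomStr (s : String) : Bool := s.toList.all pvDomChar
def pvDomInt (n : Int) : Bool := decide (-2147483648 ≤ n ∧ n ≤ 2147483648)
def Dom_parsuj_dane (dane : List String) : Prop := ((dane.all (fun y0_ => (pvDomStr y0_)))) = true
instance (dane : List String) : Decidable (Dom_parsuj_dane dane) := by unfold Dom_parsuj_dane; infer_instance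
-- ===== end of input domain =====

-- B replaces A's last-marker-index scan plus slicing by one accumulator pass that flushes the
-- pending tail into the param part at each '****' marker (objective: alternative, same cost).

-- ===== PORT A =====
-- forward pass: indeks ends as (last index of '****') + 1, or 0 if absent
def parsuj_dane (dane : List String) : List String × List String :=
  let indeks : Int :=
    (PySem.List.enumerate dane 0).foldl
      (fun acc p => if p.2 = "****" then p.1 + 1 else acc) 0
  if indeks = 0 then ([], [])  -- Python raises ValueError here; excluded by Pre_
  else (PySem.List.slice dane (some 0) (some indeks),
        "**" :: PySem.List.slice dane (some indeks) none)

-- ===== PORT B =====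
-- single pass: state (param, tail, seen); each '****' flushes tail (and the marker) into param
def parsujStep (st : List String × List String × Bool) (d : String) :
    List String × List String × Bool :=
  if d = "****" then (st.1 ++ st.2.1 ++ ["****"], [], true)
  else (st.1, st.2.1 ++ [d], st.2.2)

def parsuj_dane_alt (dane : List String) : List String × List String :=
  let st := dane.foldl parsujStep ([], [], false)
  if st.2.2 then (st.1, "**" :: st.2.1)
  else ([], [])  -- Python raises ValueError here; excluded by Pre_

-- ===== PRECONDITION & SPEC =====
-- A raises ValueError exactly when the list contains no '****' marker
def Pre_parsuj_dane (dane : List String) : Prop := "****" ∈ dane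
instance (dane : List String) : Decidable (Pre_parsuj_dane dane) := by unfold Pre_parsuj_dane; infer_instance
def pvWitness_parsuj_dane : List String := ["a", "****", "b"]

def Spec_parsuj_dane (dane : List String) (out : List String × List String) : Prop := out = parsuj_dane_alt dane
instance (dane : List String) (out : List String × List String) : Decidable (Spec_parsuj_dane dane out) := by unfold Spec_parsuj_dane; infer_instance

-- ===== CLAIM (what is proved, stated in full; the proofs are below) =====
def Claim_equal_parsuj_dane : Prop := ∀ (dane : List String), Dom_parsuj_dane dane → Pre_parsuj_dane dane → Spec_parsuj_dane dane (parsuj_dane dane)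

-- ===== LEMMAS AND PROOFS =====

-- A's forward fold computes length - (index of '****' in the reversed list), or 0 if absent
theorem foldl_enum_eq_rev_index (l : List String) :
    (PySem.List.enumerate l 0).foldl
      (fun acc p => if p.2 = "****" then p.1 + 1 else acc) (0 : Int)
    = (match PySem.List.index? l.reverse "****" with
       | none => (0 : Int)
       | some j => (l.length : Int) - (j : Int)) := by
  induction l using List.reverseRecOn with
  | nil => simp [PySem.List.enumerate]
  | append_singleton l x ih =>
    rw [PySem.List.enumerate_append, List.foldl_append, ih]
    by_cases hx : x = "****"
    · subst hx
      rw [List.reverse_append, List.reverse_singleton, List.singleton_append,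
          PySem.List.index?_cons_self]
      simp [PySem.List.enumerate]
    · rw [List.reverse_append, List.reverse_singleton, List.singleton_append,
          PySem.List.index?_cons_of_ne _ hx]
      cases h : PySem.List.index? l.reverse "****" with
      | none => simp [PySem.List.enumerate, hx]
      | some j => simp [PySem.List.enumerate, hx]

-- B's fold state is (take k, drop k, true) at the split point k = length - (reverse index), or
-- ([], l, false) when the marker is absent
theorem foldl_parsujStep_eq (l : List String) :
    l.foldl parsujStep ([], [], false)
    = (match PySem.List.index? l.reverse "****" with
       | none => (([] : List String), l, false)
       | some j => (l.take (l.length - j), l.drop (l.length - j), true)) := by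
  induction l using List.reverseRecOn with
  | nil => simp
  | append_singleton l x ih =>
    rw [List.foldl_append, ih, List.reverse_append, List.reverse_singleton,
        List.singleton_append]
    by_cases hx : x = "****"
    · subst hx
      rw [PySem.List.index?_cons_self]
      cases h : PySem.List.index? l.reverse "****" with
      | none => simp [parsujStep]
      | some j =>
        obtain ⟨hk, -, -⟩ := PySem.List.getElem_of_index?_eq_some h
        have hjl : j < l.length := by simpa using hk
        simp [parsujStep]
    · rw [PySem.List.index?_cons_of_ne _ hx]
      cases h : PySem.List.index? l.reverse "****" with
      | none => simp [parsujStep, hx]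
      | some j =>
        obtain ⟨hk, -, -⟩ := PySem.List.getElem_of_index?_eq_some h
        have hjl : j < l.length := by simpa using hk
        have h1 : l.length - j ≤ l.length := by omega
        simp [parsujStep, hx,
              List.take_append_of_le_length h1, List.drop_append_of_le_length h1]

-- ===== VERDICT (by name: the statement is the Claim_ definition above) =====
theorem parsuj_dane_spec : Claim_equal_parsuj_dane := by
  intro dane _ hpre
  unfold Spec_parsuj_dane parsuj_dane parsuj_dane_alt
  rw [foldl_enum_eq_rev_index, foldl_parsujStep_eq]
  have hmem : "****" ∈ dane.reverse := by simpa using hpre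
  obtain ⟨j, hj⟩ := Option.isSome_iff_exists.mp
    ((PySem.List.index?_isSome_iff dane.reverse "****").mpr hmem)
  rw [hj]
  obtain ⟨hk, -, -⟩ := PySem.List.getElem_of_index?_eq_some hj
  have hjlt : j < dane.length := by simpa using hk
  have hne : (dane.length : Int) - (j : Int) ≠ 0 := by omega
  have hsl : PySem.List.slice dane (some 0) (some ((dane.length : Int) - j))
      = dane.take (dane.length - j) := by
    rw [PySem.List.slice_toNat dane (by omega) (by omega)]
    simp
  have hsl2 : PySem.List.slice dane (some ((dane.length : Int) - j)) none
      = dane.drop (dane.length - j) := by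
    rw [PySem.List.slice_from dane (by omega)]
    congr 1; omega
  simp [hne, hsl, hsl2]
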